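-- pv_equiv track=rewrite | github.com/Cipherpy/ADRIF | src/nms_metrics.py | create_class_mapping
-- ===== SOURCE A (Python) =====
-- def create_class_mapping(annotations_dict):
--     """Create mapping from class names to class IDs."""
--     class_to_id = {}
--     id_counter = 0
--
--     for file_annotations in annotations_dict.values():
--         for ann in file_annotations:
--             class_name = ann[0]
--             if isinstance(class_name, str) and class_name not in class_to_id:
--                 class_to_id[class_name] = id_counter
--                 id_counter += 1
--
--     return class_to_id
-- ===== SOURCE B (Python) =====
-- def create_class_mapping(annotations_dict):
--     """Create mapping from class names to class IDs."""
--     flat = [ann[0] for anns in annotations_dict.values() for ann in anns]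
--     strs = [n for n in flat if isinstance(n, str)]
--     order = sorted(set(strs), key=strs.index)
--     return {n: i for i, n in enumerate(order)}
-- ===== Notes on version B (the rewrite author's own statement) =====
-- stated objective: alternative
-- what changed: Instead of A's single pass threading a mutable dict and an id counter, B collects the class names into an unordered set and reconstructs first-occurrence order by sorting the set with key=strs.index, then enumerates; it trades A's O(n) pass for O(n^2) index lookups of similar practical cost on small class sets.
import Mathlib
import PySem

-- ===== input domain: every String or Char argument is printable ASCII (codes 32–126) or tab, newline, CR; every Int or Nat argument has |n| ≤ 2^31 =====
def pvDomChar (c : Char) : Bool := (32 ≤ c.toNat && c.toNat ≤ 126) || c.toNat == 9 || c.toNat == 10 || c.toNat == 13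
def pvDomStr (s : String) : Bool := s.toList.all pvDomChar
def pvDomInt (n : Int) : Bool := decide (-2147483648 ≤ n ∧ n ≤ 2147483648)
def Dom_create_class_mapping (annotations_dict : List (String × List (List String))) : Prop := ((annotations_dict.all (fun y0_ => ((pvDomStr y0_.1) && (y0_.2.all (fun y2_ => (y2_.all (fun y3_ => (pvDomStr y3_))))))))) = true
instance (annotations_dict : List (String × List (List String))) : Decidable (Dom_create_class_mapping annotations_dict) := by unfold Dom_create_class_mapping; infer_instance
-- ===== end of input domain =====

-- B recovers the mapping by sorting the SET of class names by first-occurrence index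
-- (sorted(set(strs), key=strs.index)) instead of A's single pass threading a dict and an
-- id counter; same values, B pays O(n^2) for the index keys (objective: alternative).

-- ===== PORT A =====
-- one annotation step: class_name = ann[0]; isinstance(class_name, str) is always true here
-- (annotations carry strings by type); 'none' = IndexError in Python, excluded by Pre_.
def ccmStep (st : PySem.Dict String Int × Int) (ann : List String) : PySem.Dict String Int × Int :=
  match PySem.List.pyGet? ann 0 with
  | none => st   -- Python raises IndexError here; outside Pre_create_class_mapping
  | some class_name =>
      if st.1.contains class_name then st
      else (st.1.insert class_name st.2, st.2 + 1)

def create_class_mapping (annotations_dict : List (String × List (List String))) : List (String × Int) :=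
  let st := annotations_dict.foldl
    (fun st kv => kv.2.foldl ccmStep st)
    (PySem.Dict.empty, 0)
  st.1.items

-- ===== PORT B =====
-- flat = [ann[0] for anns in d.values() for ann in anns]  (Option String: none = IndexError, outside Pre_)
-- strs = [n for n in flat if isinstance(n, str)]
-- order = sorted(set(strs), key=strs.index)   (keys are distinct, so the set's hash order is irrelevant)
-- {n: i for i, n in enumerate(order)}
def create_class_mapping_alt (annotations_dict : List (String × List (List String))) : List (String × Int) :=
  let flat := annotations_dict.flatMap (fun kv => kv.2.map (fun ann => PySem.List.pyGet? ann 0))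
  let strs := flat.filterMap id
  let order := PySem.List.sorted (PySem.Set.ofList strs)
    (fun n => (PySem.List.index? strs n).getD 0) false
  order.zipIdx.map (fun p => (p.1, (p.2 : Int)))

-- ===== PRECONDITION & SPEC =====
-- Pre_ excludes exactly the inputs where Python A raises IndexError: an empty annotation list entry (ann = []).
def Pre_create_class_mapping (annotations_dict : List (String × List (List String))) : Prop :=
  ∀ kv ∈ annotations_dict, ∀ ann ∈ kv.2, ann ≠ []
instance (annotations_dict : List (String × List (List String))) : Decidable (Pre_create_class_mapping annotations_dict) := by unfold Pre_create_class_mapping; infer_instance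
def pvWitness_create_class_mapping : (List (String × List (List String))) :=
  [("a.png", [["cat", "1"], ["dog"]]), ("b.png", [["cat"], ["bird"]])]

def Spec_create_class_mapping (annotations_dict : List (String × List (List String))) (out : List (String × Int)) : Prop := out = create_class_mapping_alt annotations_dict
instance (annotations_dict : List (String × List (List String))) (out : List (String × Int)) : Decidable (Spec_create_class_mapping annotations_dict out) := by unfold Spec_create_class_mapping; infer_instance

-- ===== CLAIM (what is proved, stated in full; the proofs are below) =====
def Claim_equal_create_class_mapping : Prop := ∀ (annotations_dict : List (String × List (List String))), Dom_create_class_mapping annotations_dict → Pre_create_class_mapping annotations_dict → Spec_create_class_mapping annotations_dict (create_class_mapping annotations_dict)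

-- ===== LEMMAS AND PROOFS =====

-- abstraction: A's loop state as a function of the unique names seen so far, in order
def ccmEnc (names : List String) : List (String × Int) :=
  names.zipIdx.map (fun p => (p.1, (p.2 : Int)))

def ccmAbst (names : List String) : PySem.Dict String Int × Int :=
  (PySem.Dict.mk (ccmEnc names), (names.length : Int))

-- A's per-option step, so the nested loops become one fold over the flattened option list
def ccmStepO (st : PySem.Dict String Int × Int) (o : Option String) : PySem.Dict String Int × Int :=
  match o with
  | none => st
  | some n => if st.1.contains n then st else (st.1.insert n st.2, st.2 + 1)

theorem ccmEnc_append (names : List String) (n : String) :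
    ccmEnc (names ++ [n]) = ccmEnc names ++ [(n, (names.length : Int))] := by
  unfold ccmEnc; simp [List.zipIdx_append]

theorem ccmAbst_contains (names : List String) (n : String) :
    (ccmAbst names).1.contains n = decide (n ∈ names) := by
  rw [ccmAbst, PySem.Dict.contains_eq_decide_mem_keys]
  simp [PySem.Dict.keys, ccmEnc, Function.comp_def]

theorem ccmStepO_abst (names : List String) (o : Option String) :
    ccmStepO (ccmAbst names) o =
      ccmAbst (match o with | none => names | some n => PySem.Set.add names n) := by
  cases o with
  | none => rfl
  | some n =>
      show ccmStepO (ccmAbst names) (some n) = ccmAbst (PySem.Set.add names n)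
      by_cases h : n ∈ names
      · simp [ccmStepO, ccmAbst_contains, h]
      · have hadd : PySem.Set.add names n = names ++ [n] := by
          simp [PySem.Set.add, PySem.Set.contains, h]
        have hc : (ccmAbst names).1.contains n = false := by
          simp [ccmAbst_contains, h]
        simp only [ccmStepO, hc, Bool.false_eq_true, if_false, hadd]
        refine Prod.ext ?_ ?_
        · apply PySem.Dict.ext
          rw [PySem.Dict.items_insert_of_not_contains _ _ hc]
          show (ccmEnc names) ++ [(n, (names.length : Int))] = (ccmEnc (names ++ [n]))
          rw [ccmEnc_append]
        · show ((names.length : Int) + 1) = (((names ++ [n]).length : Int))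
          simp

theorem ccm_fold (os : List (Option String)) :
    ∀ names : List String,
      os.foldl ccmStepO (ccmAbst names) = ccmAbst (PySem.Set.update names (os.filterMap id)) := by
  induction os with
  | nil => intro names; simp [PySem.Set.update]
  | cons o t ih =>
      intro names
      simp only [List.foldl_cons, ccmStepO_abst]
      cases o with
      | none => simpa using ih names
      | some n => simpa [PySem.Set.update] using ih (PySem.Set.add names n)

-- the nested loops of A as one fold over the flattened option list
theorem ccm_nested_fold (d : List (String × List (List String)))
    (i : PySem.Dict String Int × Int) :
    d.foldl (fun st kv => kv.2.foldl ccmStep st) i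
      = (d.flatMap (fun kv => kv.2.map (fun ann => PySem.List.pyGet? ann 0))).foldl ccmStepO i := by
  induction d generalizing i with
  | nil => rfl
  | cons a t ih =>
      simp only [List.flatMap_cons, List.foldl_append, List.foldl_cons, List.foldl_map, ih]
      congr 1


theorem ccm_index?_append_not_mem (pre l : List String) (v : String) (h : v ∉ pre) :
    PySem.List.index? (pre ++ l) v = (PySem.List.index? l v).map (· + pre.length) := by
  induction pre with
  | nil => simp [Option.map_id']
  | cons x t ih =>
      have hx : x ≠ v := fun e => h (by simp [e])
      have hv : v ∉ t := fun e => h (List.mem_cons_of_mem _ e)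
      rw [List.cons_append, PySem.List.index?_cons_of_ne _ hx, ih hv]
      cases PySem.List.index? l v
      · simp
      · simp
        omega

theorem ccm_fold_inv (xs : List String) :
    ∀ (t acc pre : List String), xs = pre ++ t →
      (∀ a, a ∈ acc ↔ a ∈ pre) →
      acc.Pairwise (fun a b => (PySem.List.index? xs a).getD 0 < (PySem.List.index? xs b).getD 0) →
      (t.foldl PySem.Set.add acc).Pairwise
        (fun a b => (PySem.List.index? xs a).getD 0 < (PySem.List.index? xs b).getD 0) := by
  intro t
  induction t with
  | nil => intro acc pre _ _ hp; simpa using hp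
  | cons n t ih =>
      intro acc pre hxs hmem hp
      simp only [List.foldl_cons]
      by_cases hn : n ∈ acc
      · have : PySem.Set.add acc n = acc := by simp [PySem.Set.add, PySem.Set.contains, hn]
        rw [this]
        exact ih acc (pre ++ [n]) (by simp [hxs]) (fun a => by
          constructor
          · intro ha; exact List.mem_append_left _ ((hmem a).1 ha)
          · intro ha; rcases List.mem_append.1 ha with h | h
            · exact (hmem a).2 h
            · simp at h; subst h; exact hn) hp
      · have hset : PySem.Set.add acc n = acc ++ [n] := by
          simp [PySem.Set.add, PySem.Set.contains, hn]
        rw [hset]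
        have hnpre : n ∉ pre := fun h => hn ((hmem n).2 h)
        have hkn : PySem.List.index? xs n = some pre.length := by
          rw [hxs, ccm_index?_append_not_mem _ _ _ hnpre, PySem.List.index?_cons_self]
          simp
        have hlt : ∀ a ∈ acc,
            (PySem.List.index? xs a).getD 0 < (PySem.List.index? xs n).getD 0 := by
          intro a ha
          have hapre : a ∈ pre := (hmem a).1 ha
          have : PySem.List.index? xs a = PySem.List.index? pre a := by
            rw [hxs, PySem.List.index?_append_of_mem _ hapre]
          rcases (PySem.List.index?_isSome_iff pre a).2 hapre |> Option.isSome_iff_exists.1 with ⟨k, hk⟩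
          rcases PySem.List.getElem_of_index?_eq_some hk with ⟨hklt, _, _⟩
          rw [this, hk, hkn]
          simpa using hklt
        refine ih (acc ++ [n]) (pre ++ [n]) (by simp [hxs]) (fun a => by simp [hmem a]) ?_
        refine List.pairwise_append.2 ⟨hp, List.pairwise_singleton _ _, ?_⟩
        intro a ha b hb; simp at hb; subst hb; exact hlt a ha

-- the dedup of xs is strictly increasing in first-occurrence index, so B's sort is the identity
theorem ccm_dedup_pairwise_idx (xs : List String) :
    (PySem.Set.ofList xs).Pairwise
      (fun a b => (PySem.List.index? xs a).getD 0 < (PySem.List.index? xs b).getD 0) := by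
  simpa [PySem.Set.ofList, PySem.Set.empty] using
    ccm_fold_inv xs xs [] [] rfl (by simp) (by simp)

-- B's sort leaves the first-occurrence dedup unchanged
theorem ccm_sorted_ofList (xs : List String) :
    PySem.List.sorted (PySem.Set.ofList xs) (fun n => (PySem.List.index? xs n).getD 0) false
      = PySem.Set.ofList xs := by
  apply PySem.List.sorted_eq_of_perm_of_pairwise_lt
  · exact List.Perm.refl _
  · exact ccm_dedup_pairwise_idx xs

-- ===== VERDICT (by name: the statement is the Claim_ definition above) =====
theorem create_class_mapping_spec : Claim_equal_create_class_mapping := by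
  intro d _ _
  show create_class_mapping d = create_class_mapping_alt d
  unfold create_class_mapping create_class_mapping_alt
  rw [show ((PySem.Dict.empty : PySem.Dict String Int), (0 : Int)) = ccmAbst [] from rfl,
      ccm_nested_fold, ccm_fold, PySem.Set.update_nil_left]
  simp only [ccm_sorted_ofList, ccmAbst, ccmEnc]
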